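-- pv_equiv track=rewrite | github.com/code101-wq/ballotapp | b_app/main.py | check_name_similarity
-- ===== SOURCE A (Python) =====
-- def check_name_similarity(user_name, ballot_name, min_length=4):
--     """
--     Checks if there are 'min_length' continuous matching characters
--     (case-insensitive and removing spaces) between the user name and ballot name.
--     """
--
--     # 1. Normalize and strip non-alphanumeric characters
--     def normalize_string(s):
--         return ''.join(filter(str.isalnum, s)).lower()
--
--     normalized_user = normalize_string(user_name)
--     normalized_ballot = normalize_string(ballot_name)
--
--     if len(normalized_user) < min_length or len(normalized_ballot) < min_length:
--         return False # Cannot have a match of min_length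
--
--     # 2. Generate all substrings of min_length from the user name
--     user_substrings = set()
--     for i in range(len(normalized_user) - min_length + 1):
--         user_substrings.add(normalized_user[i:i+min_length])
--
--     # 3. Check if any user substring is present in the ballot name
--     for sub in user_substrings:
--         if sub in normalized_ballot:
--             # Found a match!
--             return True
--
--     return False
-- ===== SOURCE B (Python) =====
-- def check_name_similarity(user_name, ballot_name, min_length=4):
--     """Same check via window-set intersection: hash both names' windows once
--     instead of running a substring search over the ballot for every user window."""
--
--     def normalize_string(s):
--         return ''.join(filter(str.isalnum, s)).lower()
--
--     def windows(s):
--         return {s[i:i + min_length] for i in range(len(s) - min_length + 1)}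
--
--     normalized_user = normalize_string(user_name)
--     normalized_ballot = normalize_string(ballot_name)
--
--     if len(normalized_user) < min_length or len(normalized_ballot) < min_length:
--         return False
--
--     return not windows(normalized_user).isdisjoint(windows(normalized_ballot))
-- ===== Notes on version B (the rewrite author's own statement) =====
-- stated objective: alternative
-- what changed: Instead of running a substring search over the ballot for every user window, B builds the length-min_length window sets of both normalized names once and tests them for set intersection.
import Mathlib
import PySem

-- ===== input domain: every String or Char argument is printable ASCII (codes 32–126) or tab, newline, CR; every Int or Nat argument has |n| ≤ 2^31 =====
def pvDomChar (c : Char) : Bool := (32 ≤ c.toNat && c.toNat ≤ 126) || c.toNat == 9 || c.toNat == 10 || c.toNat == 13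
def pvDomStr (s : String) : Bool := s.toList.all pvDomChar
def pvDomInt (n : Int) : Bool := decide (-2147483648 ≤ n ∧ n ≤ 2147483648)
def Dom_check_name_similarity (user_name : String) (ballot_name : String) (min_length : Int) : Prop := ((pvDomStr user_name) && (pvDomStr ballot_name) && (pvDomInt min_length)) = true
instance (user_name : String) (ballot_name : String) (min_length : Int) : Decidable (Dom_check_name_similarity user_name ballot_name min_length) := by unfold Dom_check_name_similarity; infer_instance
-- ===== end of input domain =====

-- B replaces A's per-window substring search over the ballot by intersecting the two
-- names' window sets (objective: alternative decomposition, same observable results).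

-- ===== PORT A =====
-- normalize_string(s) = ''.join(filter(str.isalnum, s)).lower()  (shared helper of both Pythons)
def pvNormalize (s : String) : List Char :=
  PySem.Chars.lower (s.toList.filter PySem.Chars.isalnum)

def check_name_similarity (user_name : String) (ballot_name : String) (min_length : Int) : Bool :=
  let normalized_user := pvNormalize user_name
  let normalized_ballot := pvNormalize ballot_name
  if (normalized_user.length : Int) < min_length ∨ (normalized_ballot.length : Int) < min_length then
    false
  else
    -- user_substrings = set(); for i in range(...): user_substrings.add(u[i:i+min_length])
    let user_substrings : PySem.Set (List Char) :=
      (PySem.List.pyRange 0 ((normalized_user.length : Int) - min_length + 1) 1).foldl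
        (fun st i => PySem.Set.add st
          (PySem.List.slice normalized_user (some i) (some (i + min_length))))
        PySem.Set.empty
    -- for sub in user_substrings: if sub in normalized_ballot: return True;  return False
    user_substrings.any (fun sub => PySem.Chars.isIn sub normalized_ballot)

-- ===== PORT B =====
-- windows(s) = {s[i:i+min_length] for i in range(len(s) - min_length + 1)}
def pvWindowList (s : List Char) (m : Int) : List (List Char) :=
  (PySem.List.pyRange 0 ((s.length : Int) - m + 1) 1).map
    (fun i => PySem.List.slice s (some i) (some (i + m)))

def pvWindows (s : List Char) (m : Int) : PySem.Set (List Char) :=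
  PySem.Set.ofList (pvWindowList s m)

def check_name_similarity_alt (user_name : String) (ballot_name : String) (min_length : Int) : Bool :=
  let normalized_user := pvNormalize user_name
  let normalized_ballot := pvNormalize ballot_name
  if (normalized_user.length : Int) < min_length ∨ (normalized_ballot.length : Int) < min_length then
    false
  else
    !(PySem.Set.isdisjoint (pvWindows normalized_user min_length)
        (pvWindows normalized_ballot min_length))

-- ===== PRECONDITION & SPEC =====
def Spec_check_name_similarity (user_name : String) (ballot_name : String) (min_length : Int) (out : Bool) : Prop := out = check_name_similarity_alt user_name ballot_name min_length
instance (user_name : String) (ballot_name : String) (min_length : Int) (out : Bool) : Decidable (Spec_check_name_similarity user_name ballot_name min_length out) := by unfold Spec_check_name_similarity; infer_instance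

-- ===== CLAIM (what is proved, stated in full; the proofs are below) =====
def Claim_equal_check_name_similarity : Prop := ∀ (user_name : String) (ballot_name : String) (min_length : Int), Dom_check_name_similarity user_name ballot_name min_length → Spec_check_name_similarity user_name ballot_name min_length (check_name_similarity user_name ballot_name min_length)

-- ===== LEMMAS AND PROOFS =====

-- A's foldl-built set is exactly B's window set.
lemma pv_fold_eq_windows (s : List Char) (m : Int) :
    (PySem.List.pyRange 0 ((s.length : Int) - m + 1) 1).foldl
      (fun st i => PySem.Set.add st (PySem.List.slice s (some i) (some (i + m))))
      PySem.Set.empty = pvWindows s m := by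
  rw [pvWindows, pvWindowList, PySem.Set.ofList_eq_foldl, List.foldl_map]
  rfl

-- For m ≤ 0 the window at i = len s is the empty string.
lemma pv_nil_mem_windowList (s : List Char) (m : Int) (hm : m ≤ 0) :
    [] ∈ pvWindowList s m := by
  refine List.mem_map.mpr ⟨(s.length : Int), ?_, ?_⟩
  · rw [PySem.List.mem_pyRange_one]
    constructor <;> omega
  · refine List.length_eq_zero_iff.mp ?_
    rw [PySem.List.length_slice]
    have h1 := PySem.List.clampIdx_le s.length ((s.length : Int) + m)
    have h2 : PySem.List.clampIdx s.length (s.length : Int) = s.length := by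
      simp
    omega

-- For 1 ≤ m, every window of s has length m.toNat.
lemma pv_window_len (s : List Char) (m : Int) (hm : 1 ≤ m) (sub : List Char)
    (h : sub ∈ pvWindowList s m) : sub.length = m.toNat := by
  obtain ⟨i, hi, rfl⟩ := List.mem_map.mp h
  rw [PySem.List.mem_pyRange_one] at hi
  obtain ⟨h0, h1⟩ := hi
  lift i to ℕ using h0 with j
  lift m to ℕ using (by omega : (0 : Int) ≤ m) with n
  rw [PySem.List.slice_natCast_add]
  simp only [List.length_take, List.length_drop, Int.toNat_natCast]
  omega

-- For 1 ≤ m and sub of length m, sub is a window of s iff sub is an infix of s.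
lemma pv_mem_windowList_iff_infix (s : List Char) (m : Int) (hm : 1 ≤ m)
    (sub : List Char) (hlen : sub.length = m.toNat) :
    sub ∈ pvWindowList s m ↔ sub <:+: s := by
  lift m to ℕ using (by omega : (0 : Int) ≤ m) with n
  constructor
  · intro h
    obtain ⟨i, hi, rfl⟩ := List.mem_map.mp h
    rw [PySem.List.mem_pyRange_one] at hi
    lift i to ℕ using hi.1 with j
    rw [PySem.List.slice_natCast_add]
    exact ((List.take_prefix n (s.drop j)).isInfix).trans ((List.drop_suffix j s).isInfix)
  · rintro ⟨pre, suf, rfl⟩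
    have hlen' : sub.length = n := by simpa using hlen
    refine List.mem_map.mpr ⟨(pre.length : Int), ?_, ?_⟩
    · rw [PySem.List.mem_pyRange_one]
      have : (pre ++ sub ++ suf).length = pre.length + sub.length + suf.length := by
        simp only [List.length_append]
      constructor <;> omega
    · rw [PySem.List.slice_natCast_add]
      rw [List.append_assoc, List.drop_left]
      rw [← hlen', List.take_left]

-- ===== VERDICT (by name: the statement is the Claim_ definition above) =====
theorem check_name_similarity_spec : Claim_equal_check_name_similarity := by
  intro u b m _
  unfold Spec_check_name_similarity check_name_similarity check_name_similarity_alt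
  simp only [pv_fold_eq_windows]
  set nu := pvNormalize u
  set nb := pvNormalize b
  split_ifs with hg
  · rfl
  · rw [Bool.eq_iff_iff]
    simp only [pvWindows]
    constructor
    · intro h
      obtain ⟨sub, hsub, hin⟩ := List.any_eq_true.mp h
      have hsub' : sub ∈ pvWindowList nu m := (PySem.Set.mem_ofList _ _).mp hsub
      have hinf : sub <:+: nb := (PySem.Chars.isIn_iff_infix _ _).mp hin
      have hx : ∃ x, x ∈ PySem.Set.ofList (pvWindowList nu m) ∧
          x ∈ PySem.Set.ofList (pvWindowList nb m) := by
        by_cases hm : 1 ≤ m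
        · exact ⟨sub, hsub, (PySem.Set.mem_ofList _ _).mpr
            ((pv_mem_windowList_iff_infix nb m hm sub
              (pv_window_len nu m hm sub hsub')).mpr hinf)⟩
        · exact ⟨[], (PySem.Set.mem_ofList _ _).mpr (pv_nil_mem_windowList nu m (by omega)),
            (PySem.Set.mem_ofList _ _).mpr (pv_nil_mem_windowList nb m (by omega))⟩
      obtain ⟨x, hx1, hx2⟩ := hx
      have hd : ¬ (PySem.Set.isdisjoint (PySem.Set.ofList (pvWindowList nu m))
          (PySem.Set.ofList (pvWindowList nb m)) = true) := by
        rw [PySem.Set.isdisjoint_iff]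
        intro hall
        exact hall x hx1 hx2
      simp [hd]
    · intro h
      have hd : ¬ (PySem.Set.isdisjoint (PySem.Set.ofList (pvWindowList nu m))
          (PySem.Set.ofList (pvWindowList nb m)) = true) := by
        simp only [Bool.not_eq_true'] at h
        rw [h]
        simp
      rw [PySem.Set.isdisjoint_iff] at hd
      simp only [not_forall, not_not] at hd
      obtain ⟨x, hx1, hx2⟩ := hd
      have hx1' : x ∈ pvWindowList nu m := (PySem.Set.mem_ofList _ _).mp hx1
      have hx2' : x ∈ pvWindowList nb m := (PySem.Set.mem_ofList _ _).mp hx2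
      refine List.any_eq_true.mpr ?_
      by_cases hm : 1 ≤ m
      · exact ⟨x, hx1, (PySem.Chars.isIn_iff_infix _ _).mpr
          ((pv_mem_windowList_iff_infix nb m hm x
            (pv_window_len nb m hm x hx2')).mp hx2')⟩
      · exact ⟨[], (PySem.Set.mem_ofList _ _).mpr (pv_nil_mem_windowList nu m (by omega)),
          (PySem.Chars.isIn_iff_infix _ _).mpr (List.nil_infix (l := nb))⟩
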